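-- pv_equiv track=rewrite | github.com/kallenlonbom/ai-script-assistant | assistant_functions/backups/function.py | find_last_import
-- ===== SOURCE A (Python) =====
-- def find_last_import(script):
--     number = -1
--     i = 0
--     for line in script:
--         if line.startswith('import') or line.startswith('from'):
--             number = i
--         i += 1
--     return number
-- ===== SOURCE B (Python) =====
-- def find_last_import(script):
--     lines = list(script)
--     for j in range(len(lines) - 1, -1, -1):
--         if lines[j].startswith('import') or lines[j].startswith('from'):
--             return j
--     return -1
-- ===== Notes on version B (the rewrite author's own statement) =====
-- stated objective: alternative
-- what changed: Scans the lines backward with early exit on the first import/from line instead of scanning forward and overwriting a 'last seen' index.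
import Mathlib
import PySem

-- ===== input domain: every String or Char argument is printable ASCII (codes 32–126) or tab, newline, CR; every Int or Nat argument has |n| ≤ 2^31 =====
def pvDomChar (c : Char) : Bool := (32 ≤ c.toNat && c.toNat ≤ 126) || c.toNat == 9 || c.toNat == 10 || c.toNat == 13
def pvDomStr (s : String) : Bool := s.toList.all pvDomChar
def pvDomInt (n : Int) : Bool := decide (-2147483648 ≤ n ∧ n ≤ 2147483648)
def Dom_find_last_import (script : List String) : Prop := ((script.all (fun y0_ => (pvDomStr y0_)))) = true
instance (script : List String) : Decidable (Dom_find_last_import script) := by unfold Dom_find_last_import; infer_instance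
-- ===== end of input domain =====

-- B scans backward with early exit instead of A's forward scan with a 'last seen' index; alternative decomposition, same cost.

-- ===== PORT A =====
-- forward loop: state (number, i), overwrite number whenever the line matches
def find_last_import (script : List String) : Int :=
  (script.foldl
    (fun (st : Int × Int) line =>
      (if PySem.Str.startswith line "import" || PySem.Str.startswith line "from" then st.2 else st.1,
       st.2 + 1))
    (-1, 0)).1

-- ===== PORT B =====
-- backward loop over the reversed list, j counting down; early return on first match
def pvRevScan : List String → Int → Int
  | [], _ => -1
  | l :: rest, j =>
      if PySem.Str.startswith l "import" || PySem.Str.startswith l "from" then j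
      else pvRevScan rest (j - 1)

def find_last_import_alt (script : List String) : Int :=
  pvRevScan script.reverse ((script.length : Int) - 1)

-- ===== PRECONDITION & SPEC =====
def Spec_find_last_import (script : List String) (out : Int) : Prop := out = find_last_import_alt script
instance (script : List String) (out : Int) : Decidable (Spec_find_last_import script out) := by unfold Spec_find_last_import; infer_instance

-- ===== CLAIM (what is proved, stated in full; the proofs are below) =====
def Claim_equal_find_last_import : Prop := ∀ (script : List String), Dom_find_last_import script → Spec_find_last_import script (find_last_import script)

-- ===== LEMMAS AND PROOFS =====
def pvCond (l : String) : Bool :=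
  PySem.Str.startswith l "import" || PySem.Str.startswith l "from"

def pvStepA (st : Int × Int) (line : String) : Int × Int :=
  (if PySem.Str.startswith line "import" || PySem.Str.startswith line "from" then st.2 else st.1,
   st.2 + 1)

theorem pvFoldA_snd (s : List String) (n i : Int) :
    (s.foldl pvStepA (n, i)).2 = i + s.length := by
  induction s generalizing n i with
  | nil => simp
  | cons x xs ih =>
      simp [pvStepA, ih]
      ring

theorem pvFoldA_snoc (s : List String) (x : String) (n i : Int) :
    (List.foldl pvStepA (n, i) (s ++ [x])).1 =
      if pvCond x then i + s.length else (List.foldl pvStepA (n, i) s).1 := by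
  rw [List.foldl_append]
  rcases h : List.foldl pvStepA (n, i) s with ⟨a, b⟩
  have hb : b = i + s.length := by
    have := pvFoldA_snd s n i
    rw [h] at this; exact this
  simp [pvStepA, pvCond, hb]

theorem pv_main (s : List String) :
    (List.foldl pvStepA (-1, 0) s).1 = pvRevScan s.reverse ((s.length : Int) - 1) := by
  induction s using List.reverseRecOn with
  | nil => simp [pvRevScan]
  | append_singleton xs x ih =>
      rw [pvFoldA_snoc]
      simp only [List.reverse_append, List.reverse_singleton, List.singleton_append,
        List.length_append, List.length_singleton, pvRevScan, pvCond]
      push_cast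
      rw [ih]
      split_ifs
      · omega
      · congr 1; ring

-- ===== VERDICT (by name: the statement is the Claim_ definition above) =====
theorem find_last_import_spec : Claim_equal_find_last_import := by
  intro script _
  unfold Spec_find_last_import find_last_import find_last_import_alt
  exact pv_main script
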